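-- pv_equiv track=rewrite | github.com/Fortunoxx/AdventOfCode2023 | src/day02.py | get_valid_games
-- ===== SOURCE A (Python) =====
-- def get_valid_games(games, data):
--     ids = []
--
--     for game_id in games:
--         valid = True
--         for color in data:
--             for item in games[game_id]:
--                 if color in item:
--                     num = item[color]
--                     if num > data[color]:
--                         valid = False
--                         break
--             if not valid:
--                 break
--         if valid:
--             ids.append(game_id)
--
--     return ids
-- ===== SOURCE B (Python) =====
-- def get_valid_games(games, data):
--     ids = []
--     for game_id, items in games.items():
--         maxseen = {}
--         for item in items:
--             for color, num in item.items():
--                 if color not in maxseen or num > maxseen[color]: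
--                     maxseen[color] = num
--         if all(maxseen.get(color, limit) <= limit for color, limit in data.items()):
--             ids.append(game_id)
--     return ids
-- ===== Notes on version B (the rewrite author's own statement) =====
-- stated objective: alternative
-- what changed: B replaces A's color-outer/item-inner short-circuiting rescan of each game with a two-phase pass: one sweep per game building a dict of the maximum count seen per color, then a single comparison of that table against the limits.
import Mathlib
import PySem

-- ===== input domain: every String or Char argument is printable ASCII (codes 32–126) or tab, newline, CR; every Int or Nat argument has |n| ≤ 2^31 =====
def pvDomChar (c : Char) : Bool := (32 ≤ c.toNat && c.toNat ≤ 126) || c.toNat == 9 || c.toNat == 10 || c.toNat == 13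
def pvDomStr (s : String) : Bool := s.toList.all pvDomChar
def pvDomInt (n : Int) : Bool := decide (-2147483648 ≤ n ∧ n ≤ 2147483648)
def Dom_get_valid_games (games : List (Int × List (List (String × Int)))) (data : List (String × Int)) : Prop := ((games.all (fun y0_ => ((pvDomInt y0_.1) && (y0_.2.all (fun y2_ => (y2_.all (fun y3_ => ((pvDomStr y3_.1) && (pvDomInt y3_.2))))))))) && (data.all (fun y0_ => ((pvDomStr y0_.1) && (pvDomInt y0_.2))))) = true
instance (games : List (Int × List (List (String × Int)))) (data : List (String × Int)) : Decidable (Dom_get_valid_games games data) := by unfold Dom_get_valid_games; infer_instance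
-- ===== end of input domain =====

-- B replaces A's color-outer/item-inner rescan of each game by one pass building a per-color
-- maximum table, then comparing that table against the limits (alternative decomposition, same cost class).


-- ===== PORT A =====
-- inner loop: 'for item in games[game_id]: if color in item: num = item[color]; if num > data[color]: valid = False; break'
def pvItemsOkA (items : List (List (String × Int))) (color : String) (limit : Int) : Bool :=
  items.all (fun item =>
    match (PySem.Dict.mk item).get? color with
    | some num => !(num > limit)
    | none => true)

def get_valid_games (games : List (Int × List (List (String × Int)))) (data : List (String × Int)) : List Int :=
  games.foldl (fun ids p =>
    -- games[game_id] / data[color]: the keys come from the iteration itself, so the lookup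
    -- always succeeds and the .getD defaults are never reached
    let items := (PySem.Dict.mk games).getD p.1 []
    let valid := data.all (fun q => pvItemsOkA items q.1 ((PySem.Dict.mk data).getD q.1 0))
    if valid then ids ++ [p.1] else ids) []

-- ===== PORT B =====
-- 'if color not in maxseen or num > maxseen[color]: maxseen[color] = num'
def pvMaxStep (d : PySem.Dict String Int) (q : String × Int) : PySem.Dict String Int :=
  match d.get? q.1 with
  | none => d.insert q.1 q.2
  | some m => if q.2 > m then d.insert q.1 q.2 else d

def pvMaxSeen (items : List (List (String × Int))) : PySem.Dict String Int :=
  items.foldl (fun d item => item.foldl pvMaxStep d) PySem.Dict.empty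

def get_valid_games_alt (games : List (Int × List (List (String × Int)))) (data : List (String × Int)) : List Int :=
  games.foldl (fun ids p =>
    let maxseen := pvMaxSeen p.2
    if data.all (fun q => maxseen.getD q.1 q.2 ≤ q.2) then ids ++ [p.1] else ids) []

-- ===== PRECONDITION & SPEC =====
-- Pre_ excludes association lists with duplicate keys (in games, in data, or inside one item):
-- a Python dict cannot carry duplicate keys, so such inputs are artefacts of the assoc-list
-- encoding, on which A's first-match lookup and B's pairwise iteration legitimately differ.
def Pre_get_valid_games (games : List (Int × List (List (String × Int)))) (data : List (String × Int)) : Prop :=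
  (games.map Prod.fst).Nodup ∧ (data.map Prod.fst).Nodup ∧
    ∀ p ∈ games, ∀ item ∈ p.2, (item.map Prod.fst).Nodup
instance (games : List (Int × List (List (String × Int)))) (data : List (String × Int)) : Decidable (Pre_get_valid_games games data) := by unfold Pre_get_valid_games; infer_instance

def pvWitness_get_valid_games : (List (Int × List (List (String × Int)))) × (List (String × Int)) :=
  ([(1, [[("red", 2)], [("red", 1), ("blue", 4)]]), (2, [[("blue", 9)]])], [("red", 3), ("blue", 5)])

def Spec_get_valid_games (games : List (Int × List (List (String × Int)))) (data : List (String × Int)) (out : List Int) : Prop := out = get_valid_games_alt games data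
instance (games : List (Int × List (List (String × Int)))) (data : List (String × Int)) (out : List Int) : Decidable (Spec_get_valid_games games data out) := by unfold Spec_get_valid_games; infer_instance

-- ===== CLAIM (what is proved, stated in full; the proofs are below) =====
def Claim_equal_get_valid_games : Prop := ∀ (games : List (Int × List (List (String × Int)))) (data : List (String × Int)), Dom_get_valid_games games data → Pre_get_valid_games games data → Spec_get_valid_games games data (get_valid_games games data)

-- ===== LEMMAS AND PROOFS =====

theorem pv_all_congr_mem {α : Type} (l : List α) (p q : α → Bool)
    (h : ∀ a ∈ l, p a = q a) : l.all p = l.all q := by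
  induction l with
  | nil => rfl
  | cons x xs ih =>
    simp only [List.all_cons, h x (List.mem_cons_self ..),
      ih (fun a ha => h a (List.mem_cons_of_mem _ ha))]

-- the per-key view of pvMaxStep folded over a flat pair list
def pvMaxO (c : String) (ps : List (String × Int)) (o : Option Int) : Option Int :=
  ps.foldl (fun o q =>
    if q.1 = c then
      some (match o with | none => q.2 | some m => if q.2 > m then q.2 else m)
    else o) o

theorem pvMaxStep_get? (ps : List (String × Int)) (d : PySem.Dict String Int) (c : String) :
    (ps.foldl pvMaxStep d).get? c = pvMaxO c ps (d.get? c) := by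
  induction ps generalizing d with
  | nil => rfl
  | cons q ps ih =>
    simp only [List.foldl_cons, pvMaxO] at ih ⊢
    rw [ih]
    congr 1
    by_cases hc : q.1 = c
    · subst hc
      simp only [pvMaxStep]
      cases h : d.get? q.1 with
      | none => simp [PySem.Dict.get?_insert_self]
      | some m =>
        by_cases hq : q.2 > m
        · simp [hq, PySem.Dict.get?_insert_self]
        · simp [hq, h]
    · have hne : c ≠ q.1 := fun he => hc he.symm
      simp only [pvMaxStep, if_neg hc]
      cases h : d.get? q.1 with
      | none => exact PySem.Dict.get?_insert_of_ne d q.2 hne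
      | some m =>
        by_cases hq : q.2 > m
        · simp only [if_pos hq]; exact PySem.Dict.get?_insert_of_ne d q.2 hne
        · simp only [if_neg hq]

theorem pvMaxO_le (c : String) (ps : List (String × Int)) (o : Option Int) (l : Int) :
    ((pvMaxO c ps o).getD l ≤ l) ↔ ((o.getD l ≤ l) ∧ ∀ q ∈ ps, q.1 = c → q.2 ≤ l) := by
  induction ps generalizing o with
  | nil => simp [pvMaxO]
  | cons q ps ih =>
    simp only [pvMaxO, List.foldl_cons] at ih ⊢
    rw [ih]
    have step : ((if q.1 = c then
        some (match o with | none => q.2 | some m => if q.2 > m then q.2 else m)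
        else o).getD l ≤ l) ↔ ((o.getD l ≤ l) ∧ (q.1 = c → q.2 ≤ l)) := by
      by_cases hq : q.1 = c
      · simp only [hq, forall_const]
        cases o with
        | none => simp
        | some m => by_cases hgt : q.2 > m <;> simp [hgt] <;> omega
      · simp [hq]
    rw [step, List.forall_mem_cons]
    tauto

-- per game: A's per-color check over the items equals B's max-table comparison
theorem pvValid_eq (items : List (List (String × Int))) (c : String) (l : Int)
    (hitems : ∀ item ∈ items, (item.map Prod.fst).Nodup) :
    pvItemsOkA items c l = decide ((pvMaxSeen items).getD c l ≤ l) := by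
  have hB : ((pvMaxSeen items).getD c l ≤ l) ↔
      ∀ q ∈ items.flatten, q.1 = c → q.2 ≤ l := by
    have hflat : pvMaxSeen items = items.flatten.foldl pvMaxStep PySem.Dict.empty := by
      simp [pvMaxSeen, List.foldl_flatten]
    rw [hflat, PySem.Dict.getD_eq_get?_getD, pvMaxStep_get?, pvMaxO_le]
    simp [PySem.Dict.get?_empty]
  have hA : pvItemsOkA items c l = true ↔
      ∀ q ∈ items.flatten, q.1 = c → q.2 ≤ l := by
    simp only [pvItemsOkA, List.all_eq_true, List.mem_flatten]
    constructor
    · rintro h q ⟨item, hitem, hq⟩ hc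
      have hn := hitems item hitem
      have hk : (PySem.Dict.mk item).keys.Nodup := by
        simpa [PySem.Dict.keys] using hn
      have : (PySem.Dict.mk item).get? c = some q.2 := by
        rw [PySem.Dict.get?_eq_some_iff_mem_items _ _ _ hk]
        simpa [← hc] using hq
      have h' := h item hitem
      rw [this] at h'
      simpa using h'
    · intro h item hitem
      cases hg : (PySem.Dict.mk item).get? c with
      | none => simp
      | some n =>
        have hn := hitems item hitem
        have hk : (PySem.Dict.mk item).keys.Nodup := by
          simpa [PySem.Dict.keys] using hn
        rw [PySem.Dict.get?_eq_some_iff_mem_items _ _ _ hk] at hg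
        have := h (c, n) ⟨item, hitem, hg⟩ rfl
        simpa using this
  rw [Bool.eq_iff_iff, hA, decide_eq_true_iff]
  exact hB.symm

-- ===== VERDICT (by name: the statement is the Claim_ definition above) =====
theorem get_valid_games_spec : Claim_equal_get_valid_games := by
  intro games data _ hpre
  rcases hpre with ⟨hg, hd, hnod⟩
  unfold Spec_get_valid_games get_valid_games get_valid_games_alt
  apply PySem.List.foldl_congr_mem
  intro acc p hp
  have hkeys : (PySem.Dict.mk games).keys.Nodup := by
    simpa [PySem.Dict.keys] using hg
  have hmem : (p.1, p.2) ∈ (PySem.Dict.mk games).items := by simpa using hp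
  have hitems : (PySem.Dict.mk games).getD p.1 [] = p.2 :=
    PySem.Dict.getD_of_mem_items _ hmem hkeys []
  have hcond : data.all (fun q => pvItemsOkA p.2 q.1 ((PySem.Dict.mk data).getD q.1 0)) =
      data.all (fun q => (pvMaxSeen p.2).getD q.1 q.2 ≤ q.2) := by
    apply pv_all_congr_mem
    intro q hq
    have hdk : (PySem.Dict.mk data).keys.Nodup := by
      simpa [PySem.Dict.keys] using hd
    have hqmem : (q.1, q.2) ∈ (PySem.Dict.mk data).items := by simpa using hq
    have hlim : (PySem.Dict.mk data).getD q.1 0 = q.2 :=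
      PySem.Dict.getD_of_mem_items _ hqmem hdk 0
    rw [hlim]
    exact pvValid_eq p.2 q.1 q.2 (hnod p hp)
  simp only [hitems, hcond]
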